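-- pv_equiv track=rewrite | github.com/Rubsun/111 | Course2_Python/map2.0/shorten_dir.py | shorten_direction
-- ===== SOURCE A (Python) =====
-- def shorten_direction(dirs: str) -> str:
--     back_dirs = {
--         'W':'E',
--         'E':'W',
--         'S':'N',
--         'N':'S',
--     }
--     result = []
--     for value in dirs:
--         if result and result[-1] == back_dirs[value]:
--             result.pop()
--         else:
--             result.append(value)
--     return ''.join(result)
-- ===== SOURCE B (Python) =====
-- def shorten_direction(dirs: str) -> str:
--     pairs = ('WE', 'EW', 'NS', 'SN')
--     s = dirs
--     changed = True
--     while changed: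
--         changed = False
--         out = []
--         i = 0
--         while i < len(s):
--             if s[i:i + 2] in pairs:
--                 i += 2
--                 changed = True
--             else:
--                 out.append(s[i])
--                 i += 1
--         s = ''.join(out)
--     return s
-- ===== Notes on version B (the rewrite author's own statement) =====
-- stated objective: alternative
-- what changed: Replaces the single left-to-right stack pass with repeated whole-string scans that delete every adjacent opposite pair (WE/EW/NS/SN) until a pass removes nothing; the two agree because this cancellation rewriting is confluent.
-- outside the precondition, e.g. on shorten_direction('WEX'): A returns 'X', B returns 'X'; on shorten_direction('WXE'): A raises KeyError, B returns 'WXE'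
import Mathlib
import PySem

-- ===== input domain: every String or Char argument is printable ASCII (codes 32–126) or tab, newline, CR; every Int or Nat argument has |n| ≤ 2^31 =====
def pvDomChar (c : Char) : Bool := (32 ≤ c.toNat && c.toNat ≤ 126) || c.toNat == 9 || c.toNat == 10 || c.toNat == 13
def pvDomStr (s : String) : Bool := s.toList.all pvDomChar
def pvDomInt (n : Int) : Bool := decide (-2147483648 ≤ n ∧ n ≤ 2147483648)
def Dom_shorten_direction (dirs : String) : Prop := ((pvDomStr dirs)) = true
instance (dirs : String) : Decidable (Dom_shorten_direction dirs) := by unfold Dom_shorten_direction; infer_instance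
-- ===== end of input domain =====

-- B replaces A's one stack pass by repeated delete-adjacent-opposite-pair scans to a fixpoint
-- (same result, a genuinely different strategy; not claimed faster).

-- ===== PORT A =====
-- Python: back_dirs[value] raises KeyError when value ∉ 'WESN' and the short-circuit reaches the
-- lookup; get? returns none there (the comparison is then false) — such inputs are outside Pre_.
def shorten_direction (dirs : String) : String :=
  let back_dirs : PySem.Dict Char Char :=
    PySem.Dict.ofList [('W', 'E'), ('E', 'W'), ('S', 'N'), ('N', 'S')]
  let result : List Char :=
    dirs.toList.foldl
      (fun result value =>
        if result ≠ [] ∧ result.getLast? = back_dirs.get? value then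
          result.dropLast
        else
          result ++ [value])
      []
  String.mk result

-- ===== PORT B =====
-- the tuple ('WE', 'EW', 'NS', 'SN'), as two-character windows
def pvPairs : List (List Char) := [['W', 'E'], ['E', 'W'], ['S', 'N'], ['S', 'N'].reverse]

-- one inner while-pass of Source B: walks the string once; `s[i:i+2] in pairs` is the two-head window,
-- on a pair skip both and set changed, else emit one character (exact: a window of length < 2 is
-- never in pairs)
def passOnce : List Char → List Char × Bool
  | a :: b :: t =>
    if [a, b] ∈ pvPairs then ((passOnce t).1, true)
    else ((a :: (passOnce (b :: t)).1), (passOnce (b :: t)).2)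
  | s => (s, false)  -- len(s) - i < 2: the window has length < 2, never in pairs

-- cited by bloop's decreasing_by (a pass that removed a pair shortened the string)
theorem passOnce_len : ∀ s : List Char,
    (passOnce s).1.length ≤ s.length ∧
      ((passOnce s).2 = true → (passOnce s).1.length + 2 ≤ s.length)
  | [] => by simp [passOnce]
  | [a] => by simp [passOnce]
  | a :: b :: t => by
    have ht := passOnce_len t
    have hbt := passOnce_len (b :: t)
    by_cases h : [a, b] ∈ pvPairs <;> simp [passOnce, h] at * <;> omega

-- the outer while-loop of Source B: repeat passes until one removes nothing
def bloop (s : List Char) : List Char :=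
  if h : (passOnce s).2 = true then bloop (passOnce s).1 else (passOnce s).1
termination_by s.length
decreasing_by have := (passOnce_len s).2 h; omega

def shorten_direction_alt (dirs : String) : String :=
  String.mk (bloop dirs.toList)

-- ===== PRECONDITION & SPEC =====
-- Pre_ excludes strings with a non-direction character at position ≥ 1: there A raises KeyError
-- whenever its result stack is non-empty at that character, which depends on run-time stack state
-- rather than a checkable input shape, so all such strings are excluded (on the few of them where
-- A does return, e.g. 'WEX', B happens to return the same value).
def Pre_shorten_direction (dirs : String) : Prop :=
  (dirs.toList.tail.all fun c => c == 'W' || c == 'E' || c == 'S' || c == 'N') = true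
instance (dirs : String) : Decidable (Pre_shorten_direction dirs) := by
  unfold Pre_shorten_direction; infer_instance

def pvWitness_shorten_direction : String := "WWENS"

def Spec_shorten_direction (dirs : String) (out : String) : Prop := out = shorten_direction_alt dirs
instance (dirs : String) (out : String) : Decidable (Spec_shorten_direction dirs out) := by unfold Spec_shorten_direction; infer_instance

-- ===== CLAIM (what is proved, stated in full; the proofs are below) =====
def Claim_equal_shorten_direction : Prop := ∀ (dirs : String), Dom_shorten_direction dirs → Pre_shorten_direction dirs → Spec_shorten_direction dirs (shorten_direction dirs)

-- ===== LEMMAS AND PROOFS =====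

-- the opposite direction (total companion of A's dict)
def opp (c : Char) : Char :=
  if c = 'W' then 'E' else if c = 'E' then 'W' else if c = 'S' then 'N' else if c = 'N' then 'S' else c

-- A's stack, kept reversed (top at the head)
def push (c : Char) (r : List Char) : List Char :=
  if r.head? = some (opp c) then r.tail else c :: r

def rstack (s : List Char) (l : List Char) : List Char :=
  l.foldl (fun r c => push c r) s

theorem dropLast_rev (l : List Char) : l.dropLast = l.reverse.tail.reverse := by
  induction l using List.reverseRecOn with
  | nil => simp
  | append_singleton t a ih => simp

-- no adjacent cancelling pair
def irr : List Char → Prop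
  | a :: b :: t => b ≠ opp a ∧ irr (b :: t)
  | _ => True

theorem opp_opp {c : Char} (h : c ∈ (['W', 'E', 'S', 'N'] : List Char)) : opp (opp c) = c := by
  fin_cases h <;> decide

theorem pair_iff {a b : Char} (h : a ∈ (['W', 'E', 'S', 'N'] : List Char)) :
    [a, b] ∈ pvPairs ↔ b = opp a := by
  fin_cases h <;> simp [pvPairs, opp]

theorem get?_back {c : Char} (h : c ∈ (['W', 'E', 'S', 'N'] : List Char)) :
    (PySem.Dict.ofList [('W', 'E'), ('E', 'W'), ('S', 'N'), ('N', 'S')] : PySem.Dict Char Char).get? c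
      = some (opp c) := by
  fin_cases h <;> decide

theorem irr_tail {a : Char} {t : List Char} (h : irr (a :: t)) : irr t := by
  cases t with
  | nil => trivial
  | cons b u => exact h.2

theorem irr_push {c : Char} {r : List Char} (h : irr r) : irr (push c r) := by
  by_cases hh : r.head? = some (opp c)
  · rw [push, if_pos hh]
    cases r with
    | nil => trivial
    | cons x u => exact irr_tail h
  · rw [push, if_neg hh]
    cases r with
    | nil => exact trivial
    | cons x u =>
      refine ⟨fun hx => hh ?_, h⟩
      simp [hx]

theorem cancel {c : Char} {r : List Char} (hc : c ∈ (['W', 'E', 'S', 'N'] : List Char))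
    (hr : irr r) : push (opp c) (push c r) = r := by
  by_cases h : r.head? = some (opp c)
  · cases r with
    | nil => simp at h
    | cons x u =>
      simp at h
      subst h
      have h1 : push c (opp c :: u) = u := by simp [push]
      rw [h1]
      cases u with
      | nil => simp [push]
      | cons y v =>
        have hy : y ≠ opp (opp c) := hr.1
        simp [push, hy]
  · have h1 : push c r = c :: r := by rw [push, if_neg h]
    rw [h1]
    simp [push, opp_opp hc]

-- ===== the A side: A's stack fold is rstack on the reversed stack =====

theorem fold_rstack (l : List Char) : ∀ res : List Char,
    (∀ c ∈ l, c ∈ (['W', 'E', 'S', 'N'] : List Char)) →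
    l.foldl
      (fun result value =>
        if result ≠ [] ∧ result.getLast? =
            (PySem.Dict.ofList [('W', 'E'), ('E', 'W'), ('S', 'N'), ('N', 'S')] :
              PySem.Dict Char Char).get? value then
          result.dropLast
        else
          result ++ [value])
      res
      = (rstack res.reverse l).reverse := by
  induction l with
  | nil => intro res _; simp [rstack]
  | cons c l ih =>
    intro res hmem
    have hc : c ∈ (['W', 'E', 'S', 'N'] : List Char) := hmem c (by simp)
    have hstep :
        (if res ≠ [] ∧ res.getLast? =
            (PySem.Dict.ofList [('W', 'E'), ('E', 'W'), ('S', 'N'), ('N', 'S')] :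
              PySem.Dict Char Char).get? c then
          res.dropLast
        else
          res ++ [c]) = (push c res.reverse).reverse := by
      rw [get?_back hc]
      unfold push
      rw [List.head?_reverse]
      by_cases h : res.getLast? = some (opp c)
      · have hne : res ≠ [] := by
          intro hnil; subst hnil; simp at h
        rw [if_pos ⟨hne, h⟩, if_pos h, dropLast_rev]
      · rw [if_neg (fun hc' => h hc'.2), if_neg h]
        simp
    rw [List.foldl_cons, hstep, ih _ (fun x hx => hmem x (by simp [hx])), List.reverse_reverse,
      rstack, rstack, List.foldl_cons]

-- ===== the B side: a pass, then the loop, do not change the stack result =====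

theorem passOnce_mem : ∀ l : List Char, ∀ x ∈ (passOnce l).1, x ∈ l
  | [] => by simp [passOnce]
  | [a] => by simp [passOnce]
  | a :: b :: t => by
    intro x hx
    by_cases h : [a, b] ∈ pvPairs <;> simp [passOnce, h] at hx
    · have := passOnce_mem t x hx; simp [this]
    · rcases hx with hx | hx
      · simp [hx]
      · have := passOnce_mem (b :: t) x hx
        simp at this
        rcases this with h' | h' <;> simp [h']

theorem passOnce_id : ∀ l : List Char, (passOnce l).2 = false → (passOnce l).1 = l
  | [] => by simp [passOnce]
  | [a] => by simp [passOnce]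
  | a :: b :: t => by
    intro h
    by_cases hp : [a, b] ∈ pvPairs <;> simp [passOnce, hp] at h ⊢
    exact passOnce_id (b :: t) h

theorem passOnce_irr : ∀ l : List Char,
    (∀ c ∈ l, c ∈ (['W', 'E', 'S', 'N'] : List Char)) → (passOnce l).2 = false → irr l
  | [] => by intro _ _; trivial
  | [a] => by intro _ _; trivial
  | a :: b :: t => by
    intro hmem h
    by_cases hp : [a, b] ∈ pvPairs <;> simp [passOnce, hp] at h
    refine ⟨?_, passOnce_irr (b :: t) (fun x hx => hmem x (by simp [hx])) h⟩
    intro hb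
    exact hp ((pair_iff (hmem a (by simp))).mpr hb)

theorem rstack_passOnce : ∀ l : List Char, ∀ s : List Char,
    (∀ c ∈ l, c ∈ (['W', 'E', 'S', 'N'] : List Char)) → irr s →
    rstack s l = rstack s (passOnce l).1
  | [] => by intro s _ _; simp [passOnce]
  | [a] => by intro s _ _; simp [passOnce]
  | a :: b :: t => by
    intro s hmem hs
    have ha : a ∈ (['W', 'E', 'S', 'N'] : List Char) := hmem a (by simp)
    by_cases hp : [a, b] ∈ pvPairs
    · have hb : b = opp a := (pair_iff ha).mp hp
      have heq : rstack s (a :: b :: t) = rstack s t := by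
        simp only [rstack, List.foldl_cons]
        rw [hb, cancel ha hs]
      simp only [passOnce, if_pos hp]
      rw [heq, rstack_passOnce t s (fun x hx => hmem x (by simp [hx])) hs]
    · simp only [passOnce, if_neg hp]
      have : rstack s (a :: b :: t) = rstack (push a s) (b :: t) := by
        simp [rstack]
      rw [this, rstack_passOnce (b :: t) (push a s) (fun x hx => hmem x (by simp [hx]))
        (irr_push hs)]
      simp [rstack]

theorem bloop_mem : ∀ l : List Char, ∀ x ∈ bloop l, x ∈ l := by
  intro l
  induction l using bloop.induct with
  | case1 l h ih =>
    rw [bloop, dif_pos h]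
    intro x hx
    exact passOnce_mem l x (ih x hx)
  | case2 l h =>
    rw [bloop, dif_neg h]
    exact passOnce_mem l

theorem rstack_bloop : ∀ l : List Char, ∀ s : List Char,
    (∀ c ∈ l, c ∈ (['W', 'E', 'S', 'N'] : List Char)) → irr s →
    rstack s l = rstack s (bloop l) := by
  intro l
  induction l using bloop.induct with
  | case1 l h ih =>
    intro s hmem hs
    rw [bloop, dif_pos h, rstack_passOnce l s hmem hs]
    exact ih s (fun x hx => hmem x (passOnce_mem l x hx)) hs
  | case2 l h =>
    intro s hmem hs
    rw [bloop, dif_neg h]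
    exact rstack_passOnce l s hmem hs

theorem bloop_irr : ∀ l : List Char,
    (∀ c ∈ l, c ∈ (['W', 'E', 'S', 'N'] : List Char)) → irr (bloop l) := by
  intro l
  induction l using bloop.induct with
  | case1 l h ih =>
    intro hmem
    rw [bloop, dif_pos h]
    exact ih (fun x hx => hmem x (passOnce_mem l x hx))
  | case2 l h =>
    intro hmem
    rw [bloop, dif_neg h]
    rw [passOnce_id l (by simpa using h)]
    exact passOnce_irr l hmem (by simpa using h)

theorem rstack_irr : ∀ w : List Char, ∀ s : List Char,
    (∀ c ∈ w, c ∈ (['W', 'E', 'S', 'N'] : List Char)) → irr w →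
    (∀ a b, s.head? = some a → w.head? = some b → b ≠ opp a) →
    rstack s w = w.reverse ++ s := by
  intro w
  induction w with
  | nil => intro s _ _ _; simp [rstack]
  | cons c w' ih =>
    intro s hmem hirr hsep
    have hc : c ∈ (['W', 'E', 'S', 'N'] : List Char) := hmem c (by simp)
    have hpush : push c s = c :: s := by
      rw [push, if_neg]
      intro hh
      rcases s with _ | ⟨a, u⟩
      · simp at hh
      · simp at hh
        exact hsep a c (by simp) (by simp) (by rw [hh, opp_opp hc])
    have : rstack s (c :: w') = rstack (c :: s) w' := by
      simp [rstack, hpush]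
    rw [this, ih (c :: s) (fun x hx => hmem x (by simp [hx])) (irr_tail hirr)
      (fun a b ha hb => by
        simp at ha
        rcases w' with _ | ⟨b', v⟩
        · simp at hb
        · simp at hb
          subst ha; subst hb
          exact hirr.1)]
    simp

-- a two-character window in pairs consists of directions
theorem pair_mem {a b : Char} (h : [a, b] ∈ pvPairs) :
    a ∈ (['W', 'E', 'S', 'N'] : List Char) ∧ b ∈ (['W', 'E', 'S', 'N'] : List Char) := by
  simp [pvPairs] at h
  rcases h with ⟨h1, h2⟩ | ⟨h1, h2⟩ | ⟨h1, h2⟩ | ⟨h1, h2⟩ <;> simp [h1, h2]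

theorem opp_invalid {x : Char} (hx : x ∉ (['W', 'E', 'S', 'N'] : List Char)) : opp x = x := by
  unfold opp
  split_ifs with h1 h2 h3 h4
  · exact absurd (by simp [h1]) hx
  · exact absurd (by simp [h2]) hx
  · exact absurd (by simp [h3]) hx
  · exact absurd (by simp [h4]) hx
  · rfl

theorem passOnce_cons_invalid {x : Char} (hx : x ∉ (['W', 'E', 'S', 'N'] : List Char)) :
    ∀ v : List Char, passOnce (x :: v) = (x :: (passOnce v).1, (passOnce v).2)
  | [] => by simp [passOnce]
  | b :: t => by
    have hnp : [x, b] ∉ pvPairs := fun h => hx (pair_mem h).1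
    simp [passOnce, hnp]

theorem bloop_cons_invalid {x : Char} (hx : x ∉ (['W', 'E', 'S', 'N'] : List Char)) :
    ∀ v : List Char, bloop (x :: v) = x :: bloop v := by
  intro v
  induction v using bloop.induct with
  | case1 v h ih =>
    conv_lhs => rw [bloop, passOnce_cons_invalid hx v]
    conv_rhs => rw [bloop, dif_pos h]
    simpa [h] using ih
  | case2 v h =>
    conv_lhs => rw [bloop, passOnce_cons_invalid hx v]
    conv_rhs => rw [bloop, dif_neg h]
    simp at h
    simp [h]

-- the whole pipeline on the character list, all-directions case
theorem stack_eq_bloop (l : List Char)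
    (hmem : ∀ c ∈ l, c ∈ (['W', 'E', 'S', 'N'] : List Char)) :
    l.foldl
      (fun result value =>
        if result ≠ [] ∧ result.getLast? =
            (PySem.Dict.ofList [('W', 'E'), ('E', 'W'), ('S', 'N'), ('N', 'S')] :
              PySem.Dict Char Char).get? value then
          result.dropLast
        else
          result ++ [value])
      [] = bloop l := by
  have h1 := fold_rstack l [] hmem
  simp only [List.reverse_nil] at h1
  rw [h1, rstack_bloop l [] hmem trivial,
    rstack_irr (bloop l) [] (fun c hc => hmem c (bloop_mem l c hc)) (bloop_irr l hmem)
      (fun a b ha _ => by simp at ha)]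
  simp

-- the whole pipeline, invalid first character: it sits under the stack (never popped, never
-- looked up) and under B's scans (no pair window contains it)
theorem stack_eq_bloop_invalid {x : Char} (hx : x ∉ (['W', 'E', 'S', 'N'] : List Char))
    (v : List Char) (hv : ∀ c ∈ v, c ∈ (['W', 'E', 'S', 'N'] : List Char)) :
    (x :: v).foldl
      (fun result value =>
        if result ≠ [] ∧ result.getLast? =
            (PySem.Dict.ofList [('W', 'E'), ('E', 'W'), ('S', 'N'), ('N', 'S')] :
              PySem.Dict Char Char).get? value then
          result.dropLast
        else
          result ++ [value])
      [] = bloop (x :: v) := by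
  rw [List.foldl_cons]
  have hstep0 :
      (if ([] : List Char) ≠ [] ∧ ([] : List Char).getLast? =
          (PySem.Dict.ofList [('W', 'E'), ('E', 'W'), ('S', 'N'), ('N', 'S')] :
            PySem.Dict Char Char).get? x then
        ([] : List Char).dropLast
      else
        ([] : List Char) ++ [x]) = [x] := by simp
  rw [hstep0]
  have h1 := fold_rstack v [x] hv
  simp only [List.reverse_cons, List.reverse_nil, List.nil_append] at h1
  rw [h1, rstack_bloop v [x] hv trivial,
    rstack_irr (bloop v) [x] (fun c hc => hv c (bloop_mem v c hc)) (bloop_irr v hv)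
      (fun a b ha hb => by
        simp at ha
        subst ha
        rw [opp_invalid hx]
        intro hbx
        exact hx (hbx ▸ hv b (bloop_mem v b (List.mem_of_mem_head? hb))))]
  rw [bloop_cons_invalid hx v]
  simp

-- ===== VERDICT (by name: the statement is the Claim_ definition above) =====
theorem shorten_direction_spec : Claim_equal_shorten_direction := by
  intro dirs _ hpre
  unfold Spec_shorten_direction
  simp only [shorten_direction, shorten_direction_alt]
  cases hl : dirs.toList with
  | nil =>
    rw [bloop]
    simp [passOnce]
  | cons x v =>
    have hv : ∀ c ∈ v, c ∈ (['W', 'E', 'S', 'N'] : List Char) := by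
      intro c hc
      have hpre' : (v.all fun c => c == 'W' || c == 'E' || c == 'S' || c == 'N') = true := by
        have := hpre
        unfold Pre_shorten_direction at this
        rw [hl] at this
        exact this
      have := List.all_eq_true.mp hpre' c hc
      simp only [Bool.or_eq_true, beq_iff_eq] at this
      simp only [List.mem_cons]
      tauto
    by_cases hx : x ∈ (['W', 'E', 'S', 'N'] : List Char)
    · refine congrArg String.mk (stack_eq_bloop (x :: v) ?_)
      intro c hc
      rcases List.mem_cons.mp hc with h | h
      · exact h ▸ hx
      · exact hv c h
    · exact congrArg String.mk (stack_eq_bloop_invalid hx v hv)
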